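-- pv_equiv track=rewrite | github.com/rokubop/roku_knausj_talon | experimental/parrot_mode_v5/parrot_utils.py | categorize_commands
-- ===== SOURCE A (Python) =====
-- def get_base_noise(noise):
--     """The part before colon or @ e.g.'pop' in 'pop:debounce-170' or 'pop@top'"""
--     base_noise = noise.split(':')[0].split('@')[0]
--     return base_noise.strip()
--
-- def categorize_commands(commands):
--     """Determine immediate vs delayed commands"""
--     immediate_commands = {}
--     delayed_commands = {}
--     base_noise_set = set()
--     base_noise_map = {}
--
--     for noise in commands.keys():
--         base_noise = get_base_noise(noise)
--         base_noise_set.add(base_noise)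
--         base_noise_map[noise] = base_noise
--
--     for noise, action in commands.items():
--         base = base_noise_map[noise]
--         if any(other_noise.startswith(f"{base} ") and other_noise != base for other_noise in base_noise_set):
--             delayed_commands[noise] = action
--         else:
--             immediate_commands[noise] = action
--
--     return immediate_commands, delayed_commands
-- ===== SOURCE B (Python) =====
-- def get_base_noise(noise):
--     """The part before colon or @ e.g.'pop' in 'pop:debounce-170' or 'pop@top'"""
--     base_noise = noise.split(':')[0].split('@')[0]
--     return base_noise.strip()
--
-- def categorize_commands(commands):
--     """Determine immediate vs delayed commands.
--
--     A base is delayed iff some base starts with it followed by a space,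
--     i.e. iff it occurs as the prefix of some base cut right before a
--     space character.  So collect, in one pass over all bases, every
--     prefix that ends immediately before a space; then each command is
--     classified by a single membership test of its own base."""
--     delayed_bases = set()
--     for noise in commands:
--         b = get_base_noise(noise)
--         pre = ""
--         for ch in b:
--             if ch == ' ':
--                 delayed_bases.add(pre)
--             pre += ch
--
--     immediate_commands = {}
--     delayed_commands = {}
--     for noise, action in commands.items():
--         if get_base_noise(noise) in delayed_bases:
--             delayed_commands[noise] = action
--         else:
--             immediate_commands[noise] = action
--     return immediate_commands, delayed_commands
-- ===== Notes on version B (the rewrite author's own statement) =====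
-- stated objective: faster
-- what changed: Replaces A's per-command linear scan of the whole base set with startswith by one pass that collects every base's prefixes ending right before a space into a set, so each command is classified by a single membership test of its own base.
import Mathlib
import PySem

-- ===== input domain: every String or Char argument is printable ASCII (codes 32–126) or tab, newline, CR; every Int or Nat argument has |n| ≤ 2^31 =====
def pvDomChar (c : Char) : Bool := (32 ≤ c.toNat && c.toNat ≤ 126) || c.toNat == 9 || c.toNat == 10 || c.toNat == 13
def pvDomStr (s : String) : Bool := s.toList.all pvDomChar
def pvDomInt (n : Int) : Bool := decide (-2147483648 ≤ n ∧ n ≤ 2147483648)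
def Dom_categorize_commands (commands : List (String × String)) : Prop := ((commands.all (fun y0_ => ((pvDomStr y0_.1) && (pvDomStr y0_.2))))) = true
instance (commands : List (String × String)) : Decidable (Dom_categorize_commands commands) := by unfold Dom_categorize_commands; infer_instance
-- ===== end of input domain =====

-- B replaces A's per-command scan of the whole base set (startswith against every
-- other base) by ONE pass collecting each base's prefixes that end right before a
-- space; a command is delayed iff its own base is in that set. Equivalence proved
-- for all inputs.

-- ===== PORT A =====
-- shared helper, identical in A and B (B keeps get_base_noise unchanged):
-- split(':') / split('@') have a nonempty literal separator, so split? is `some`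
-- and the resulting list is never empty: `.getD []` / `.headI` are exact here.
def getBaseNoise (noise : String) : String :=
  PySem.Str.strip (((PySem.Str.split?
      (((PySem.Str.split? noise ":").getD []).headI) "@").getD []).headI)

def categorize_commands (commands : List (String × String)) :
    (List (String × String)) × (List (String × String)) :=
  let base_noise_set : PySem.Set String :=
    commands.foldl (fun s p => PySem.Set.add s (getBaseNoise p.1)) PySem.Set.empty
  let base_noise_map : PySem.Dict String String :=
    commands.foldl (fun d p => d.insert p.1 (getBaseNoise p.1)) PySem.Dict.empty
  let res := commands.foldl
    (fun (acc : PySem.Dict String String × PySem.Dict String String) p =>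
      -- base_noise_map[noise]: the key was inserted in the first loop, KeyError impossible
      let base := base_noise_map.getD p.1 ""
      if base_noise_set.any (fun other =>
          PySem.Str.startswith other (base ++ " ") && other != base) then
        (acc.1, acc.2.insert p.1 p.2)
      else
        (acc.1.insert p.1 p.2, acc.2))
    (PySem.Dict.empty, PySem.Dict.empty)
  (res.1.items, res.2.items)

-- ===== PORT B =====
def categorize_commands_alt (commands : List (String × String)) :
    (List (String × String)) × (List (String × String)) :=
  let delayed_bases : PySem.Set String :=
    commands.foldl (fun s p =>
      ((getBaseNoise p.1).toList.foldl
        (fun (acc : PySem.Set String × String) ch =>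
          ((if ch == ' ' then PySem.Set.add acc.1 acc.2 else acc.1), acc.2.push ch))
        (s, "")).1)
      PySem.Set.empty
  let res := commands.foldl
    (fun (acc : PySem.Dict String String × PySem.Dict String String) p =>
      if PySem.Set.contains delayed_bases (getBaseNoise p.1) then
        (acc.1, acc.2.insert p.1 p.2)
      else
        (acc.1.insert p.1 p.2, acc.2))
    (PySem.Dict.empty, PySem.Dict.empty)
  (res.1.items, res.2.items)

-- ===== PRECONDITION & SPEC =====
def Spec_categorize_commands (commands : List (String × String)) (out : (List (String × String)) × (List (String × String))) : Prop := out = categorize_commands_alt commands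
instance (commands : List (String × String)) (out : (List (String × String)) × (List (String × String))) : Decidable (Spec_categorize_commands commands out) := by unfold Spec_categorize_commands; infer_instance

-- ===== CLAIM (what is proved, stated in full; the proofs are below) =====
def Claim_equal_categorize_commands : Prop := ∀ (commands : List (String × String)), Dom_categorize_commands commands → Spec_categorize_commands commands (categorize_commands commands)

-- ===== LEMMAS AND PROOFS =====

-- the base_noise_map lookup is just getBaseNoise on keys that occur in the list
theorem get?_foldl_insert_fun (f : String → String) (l : List (String × String))
    (d : PySem.Dict String String) (k : String) :
    (l.foldl (fun d p => d.insert p.1 (f p.1)) d).get? k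
      = if k ∈ l.map Prod.fst then some (f k) else d.get? k := by
  induction l generalizing d with
  | nil => simp
  | cons a rest ih =>
    simp only [List.foldl_cons, ih, List.map_cons, List.mem_cons]
    by_cases hm : k ∈ rest.map Prod.fst
    · simp [hm]
    · by_cases hk : k = a.1
      · subst hk; simp [hm, PySem.Dict.get?_insert_self]
      · simp [hm, hk, PySem.Dict.get?_insert]

-- one base's inner loop adds exactly the prefixes of (p ++ l) cut just before a
-- space character of l
theorem mem_spaceFold (l : List Char) (p : List Char) (s : PySem.Set String) (x : String) :
    x ∈ (l.foldl (fun (acc : PySem.Set String × String) ch =>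
          ((if ch == ' ' then PySem.Set.add acc.1 acc.2 else acc.1), acc.2.push ch))
        (s, String.ofList p)).1
      ↔ x ∈ s ∨ ∃ i, ∃ h : i < l.length, l[i] = ' ' ∧ x = String.ofList (p ++ l.take i) := by
  induction l generalizing p s with
  | nil => simp
  | cons c rest ih =>
    have hpush : (String.ofList p).push c = String.ofList (p ++ [c]) :=
      String.toList_injective (by simp)
    simp only [List.foldl_cons, hpush, ih (p ++ [c])]
    constructor
    · rintro (h | ⟨i, hi, hsp, hx⟩)
      · by_cases hc : c = ' '
        · simp only [hc, beq_self_eq_true, if_true] at h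
          rcases (PySem.Set.mem_add _ _ _).1 h with h' | h'
          · exact Or.inl h'
          · exact Or.inr ⟨0, by simp, by simp [hc], by simpa using h'⟩
        · simp only [beq_iff_eq, hc, if_false] at h
          exact Or.inl h
      · exact Or.inr ⟨i + 1, by simp only [List.length_cons]; omega, by simpa using hsp,
          by simpa [List.append_assoc] using hx⟩
    · rintro (h | ⟨i, hi, hsp, hx⟩)
      · refine Or.inl ?_
        split
        · exact (PySem.Set.mem_add _ _ _).2 (Or.inl h)
        · exact h
      · cases i with
        | zero =>
          simp only [List.getElem_cons_zero] at hsp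
          refine Or.inl ?_
          simp only [hsp, beq_self_eq_true, if_true]
          exact (PySem.Set.mem_add _ _ _).2 (Or.inr (by simpa using hx))
        | succ j =>
          exact Or.inr ⟨j, by simp only [List.length_cons] at hi; omega, by simpa using hsp,
            by simpa [List.append_assoc] using hx⟩

-- the whole delayed-bases set: membership ↔ being the cut of some base before a space
theorem mem_delayedFold (cmds : List (String × String)) (s : PySem.Set String) (x : String) :
    x ∈ cmds.foldl (fun s p =>
        ((getBaseNoise p.1).toList.foldl
          (fun (acc : PySem.Set String × String) ch =>
            ((if ch == ' ' then PySem.Set.add acc.1 acc.2 else acc.1), acc.2.push ch))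
          (s, "")).1) s
      ↔ x ∈ s ∨ ∃ q ∈ cmds, ∃ i, ∃ h : i < (getBaseNoise q.1).toList.length,
          (getBaseNoise q.1).toList[i] = ' ' ∧ x = String.ofList ((getBaseNoise q.1).toList.take i) := by
  induction cmds generalizing s with
  | nil => simp
  | cons q rest ih =>
    have h0 : ("" : String) = String.ofList ([] : List Char) := rfl
    simp only [List.foldl_cons, ih, h0, mem_spaceFold, List.mem_cons]
    constructor
    · rintro ((h | ⟨i, hi, hsp, hx⟩) | ⟨q', hq', rest'⟩)
      · exact Or.inl h
      · exact Or.inr ⟨q, Or.inl rfl, i, hi, hsp, by simpa using hx⟩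
      · exact Or.inr ⟨q', Or.inr hq', rest'⟩
    · rintro (h | ⟨q', hq' | hq', i, hi, hsp, hx⟩)
      · exact Or.inl (Or.inl h)
      · subst hq'; exact Or.inl (Or.inr ⟨i, hi, hsp, by simpa using hx⟩)
      · exact Or.inr ⟨q', hq', i, hi, hsp, hx⟩

-- "other startswith (base ++ ' ')" ↔ base is other cut just before a space
theorem prefix_iff_space (base b : String) :
    ((base ++ " ").toList <+: b.toList)
      ↔ ∃ i, ∃ h : i < b.toList.length, b.toList[i] = ' ' ∧ base = String.ofList (b.toList.take i) := by
  constructor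
  · rintro ⟨u, hu⟩
    refine ⟨base.toList.length, ?_, ?_, ?_⟩
    · have := congrArg List.length hu; simp at this ⊢; omega
    · have : b.toList = base.toList ++ ' ' :: u := by simpa using hu.symm
      simp [this]
    · have hb : b.toList = base.toList ++ ' ' :: u := by simpa using hu.symm
      apply String.toList_injective
      simp [hb]
  · rintro ⟨i, hi, hsp, hx⟩
    have hb : base.toList = b.toList.take i := by
      have := congrArg String.toList hx; simpa using this
    refine ⟨b.toList.drop (i + 1), ?_⟩
    conv_rhs => rw [← List.take_append_drop i b.toList, List.drop_eq_getElem_cons hi]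
    simp [hb, hsp]

-- A's any-startswith scan and B's delayed-set membership test agree
theorem cond_eq (commands : List (String × String)) (base : String) :
    ((commands.foldl (fun s p => PySem.Set.add s (getBaseNoise p.1)) PySem.Set.empty).any
        (fun other => PySem.Str.startswith other (base ++ " ") && other != base))
      = PySem.Set.contains
          (commands.foldl (fun s p =>
            ((getBaseNoise p.1).toList.foldl
              (fun (acc : PySem.Set String × String) ch =>
                ((if ch == ' ' then PySem.Set.add acc.1 acc.2 else acc.1), acc.2.push ch))
              (s, "")).1)
            PySem.Set.empty) base := by
  rw [Bool.eq_iff_iff]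
  have hset : commands.foldl (fun s p => PySem.Set.add s (getBaseNoise p.1)) PySem.Set.empty
      = PySem.Set.ofList (commands.map (fun p => getBaseNoise p.1)) := by
    rw [PySem.Set.ofList_eq_foldl, List.foldl_map]
    rfl
  have hcontains : PySem.Set.contains
      (commands.foldl (fun s p =>
        ((getBaseNoise p.1).toList.foldl
          (fun (acc : PySem.Set String × String) ch =>
            ((if ch == ' ' then PySem.Set.add acc.1 acc.2 else acc.1), acc.2.push ch))
          (s, "")).1)
        PySem.Set.empty) base = true
      ↔ base ∈ commands.foldl (fun s p =>
        ((getBaseNoise p.1).toList.foldl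
          (fun (acc : PySem.Set String × String) ch =>
            ((if ch == ' ' then PySem.Set.add acc.1 acc.2 else acc.1), acc.2.push ch))
          (s, "")).1) PySem.Set.empty := by
    simp [PySem.Set.contains]
  rw [hcontains, mem_delayedFold, hset, List.any_eq_true]
  constructor
  · rintro ⟨o, ho, hcond⟩
    rw [Bool.and_eq_true, bne_iff_ne] at hcond
    obtain ⟨hsw, -⟩ := hcond
    obtain ⟨q, hq, ho'⟩ := List.mem_map.1 ((PySem.Set.mem_ofList _ _).1 ho)
    subst ho'
    have hpfx : (base ++ " ").toList <+: (getBaseNoise q.1).toList :=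
      (PySem.Chars.startswith_iff (getBaseNoise q.1).toList (base ++ " ").toList).1
        (by simpa using hsw)
    obtain ⟨i, hi, hsp, hx⟩ := (prefix_iff_space base (getBaseNoise q.1)).1 hpfx
    exact Or.inr ⟨q, hq, i, hi, hsp, hx⟩
  · rintro (h | ⟨q, hq, i, hi, hsp, hx⟩)
    · simp [PySem.Set.empty] at h
    · refine ⟨getBaseNoise q.1, (PySem.Set.mem_ofList _ _).2 (List.mem_map.2 ⟨q, hq, rfl⟩), ?_⟩
      have hpfx : (base ++ " ").toList <+: (getBaseNoise q.1).toList :=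
        (prefix_iff_space base (getBaseNoise q.1)).2 ⟨i, hi, hsp, hx⟩
      have hne : getBaseNoise q.1 ≠ base := by
        intro he
        have hlen := hpfx.length_le
        rw [he] at hlen
        simp at hlen
      simpa [bne_iff_ne, hne, PySem.Chars.startswith_iff] using hpfx

theorem categorize_eq (commands : List (String × String)) :
    categorize_commands commands = categorize_commands_alt commands := by
  unfold categorize_commands categorize_commands_alt
  have hfold : commands.foldl
      (fun (acc : PySem.Dict String String × PySem.Dict String String) p =>
        let base := (commands.foldl (fun d p => d.insert p.1 (getBaseNoise p.1))
            PySem.Dict.empty).getD p.1 ""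
        if (commands.foldl (fun s p => PySem.Set.add s (getBaseNoise p.1))
            PySem.Set.empty).any (fun other =>
            PySem.Str.startswith other (base ++ " ") && other != base) then
          (acc.1, acc.2.insert p.1 p.2)
        else
          (acc.1.insert p.1 p.2, acc.2))
      (PySem.Dict.empty, PySem.Dict.empty)
    = commands.foldl
      (fun (acc : PySem.Dict String String × PySem.Dict String String) p =>
        if PySem.Set.contains
            (commands.foldl (fun s p =>
              ((getBaseNoise p.1).toList.foldl
                (fun (acc : PySem.Set String × String) ch =>
                  ((if ch == ' ' then PySem.Set.add acc.1 acc.2 else acc.1), acc.2.push ch))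
                (s, "")).1)
              PySem.Set.empty)
            (getBaseNoise p.1) then
          (acc.1, acc.2.insert p.1 p.2)
        else
          (acc.1.insert p.1 p.2, acc.2))
      (PySem.Dict.empty, PySem.Dict.empty) := by
    apply PySem.List.foldl_congr_mem
    intro acc p hp
    have hbase : (commands.foldl (fun d p => d.insert p.1 (getBaseNoise p.1))
        PySem.Dict.empty).getD p.1 "" = getBaseNoise p.1 := by
      rw [PySem.Dict.getD_eq_get?_getD, get?_foldl_insert_fun]
      have : p.1 ∈ commands.map Prod.fst := List.mem_map_of_mem hp
      simp [this]
    simp only [hbase, cond_eq]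
  simp only [hfold]

-- ===== VERDICT (by name: the statement is the Claim_ definition above) =====
theorem categorize_commands_spec : Claim_equal_categorize_commands := by
  intro commands _
  unfold Spec_categorize_commands
  exact categorize_eq commands
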